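-- pv_equiv track=rewrite | github.com/priyaanshusoni/Leetcode-Solutions | 1929-concatenation-of-array/1929-concatenation-of-array.py | getConcatenation
-- ===== SOURCE A (Python) =====
-- from typing import List
--
-- def getConcatenation(nums: List[int]) -> List[int]:
--
--     ans = []
--     numIndex = 0
--
--
--     for i in range(0,2*len(nums)):
--         if(numIndex==len(nums)): numIndex = 0
--         ans.append(nums[numIndex])
--         numIndex+=1
--
--
--     return ans
-- ===== SOURCE B (Python) =====
-- from typing import List
--
-- def getConcatenation(nums: List[int]) -> List[int]:
--     return nums + nums
-- ===== Notes on version B (the rewrite author's own statement) =====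
-- stated objective: simpler
-- what changed: Replaced the index-tracking append loop with wrap-around reset by a single list concatenation nums + nums.
import Mathlib
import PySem

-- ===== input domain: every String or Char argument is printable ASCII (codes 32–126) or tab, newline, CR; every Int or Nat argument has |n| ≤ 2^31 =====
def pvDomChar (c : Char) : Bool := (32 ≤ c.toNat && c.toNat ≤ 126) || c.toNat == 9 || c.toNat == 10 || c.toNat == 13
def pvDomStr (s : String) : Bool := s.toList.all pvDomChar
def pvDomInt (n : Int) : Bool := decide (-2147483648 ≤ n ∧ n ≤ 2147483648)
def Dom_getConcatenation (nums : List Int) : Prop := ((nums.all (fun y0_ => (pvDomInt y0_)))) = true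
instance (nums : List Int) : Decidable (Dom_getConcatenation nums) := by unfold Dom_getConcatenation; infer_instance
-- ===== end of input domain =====

-- B replaces A's 2n-step append loop (with an index that wraps back to 0) by the single
-- concatenation nums ++ nums: simpler, same result.

-- ===== PORT A =====
-- the loop body of A's 'for i in range(0, 2*len(nums))': state = (ans, numIndex);
-- the loop variable i is unused, so we recurse on the remaining iteration count.
-- nums[numIndex] is ported with pyGet? (always in range here, so .getD 0 is exact).
def getConcatenationLoop (nums : List Int) : Nat → List Int → Int → List Int
  | 0, ans, _ => ans
  | k + 1, ans, numIndex =>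
    let numIndex' := if numIndex == (nums.length : Int) then 0 else numIndex
    getConcatenationLoop nums k (ans ++ [(PySem.List.pyGet? nums numIndex').getD 0]) (numIndex' + 1)

def getConcatenation (nums : List Int) : List Int :=
  getConcatenationLoop nums (2 * nums.length) [] 0

-- ===== PORT B =====
def getConcatenation_alt (nums : List Int) : List Int := nums ++ nums

-- ===== PRECONDITION & SPEC =====
def Spec_getConcatenation (nums : List Int) (out : List Int) : Prop := out = getConcatenation_alt nums
instance (nums : List Int) (out : List Int) : Decidable (Spec_getConcatenation nums out) := by unfold Spec_getConcatenation; infer_instance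

-- ===== CLAIM (what is proved, stated in full; the proofs are below) =====
def Claim_equal_getConcatenation : Prop := ∀ (nums : List Int), Dom_getConcatenation nums → Spec_getConcatenation nums (getConcatenation nums)

-- ===== LEMMAS AND PROOFS =====

-- Running (nums.length - i) + m iterations from index i (0 ≤ i ≤ length) appends nums.drop i
-- and leaves the index at nums.length.
theorem getConcatenationLoop_run (nums : List Int) :
    ∀ (j i : Nat), i ≤ nums.length → j = nums.length - i → ∀ (m : Nat) (ans : List Int),
      getConcatenationLoop nums (j + m) ans (i : Int)
        = getConcatenationLoop nums m (ans ++ nums.drop i) (nums.length : Int) := by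
  intro j
  induction j with
  | zero =>
    intro i hle hj m ans
    have : i = nums.length := by omega
    subst this
    simp [List.drop_length]
  | succ j ih =>
    intro i hle hj m ans
    have hlt : i < nums.length := by omega
    have hne : ((i : Int) == (nums.length : Int)) = false := by
      simp; omega
    rw [show j + 1 + m = (j + m) + 1 by omega]
    rw [getConcatenationLoop]
    simp only [hne, Bool.false_eq_true, if_false]
    have hget : (PySem.List.pyGet? nums (i : Int)).getD 0 = nums[i] := by
      rw [PySem.List.pyGet?_natCast]
      simp [List.getElem?_eq_getElem hlt]
    rw [hget]
    have : ((i : Int) + 1) = ((i + 1 : Nat) : Int) := by push_cast; ring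
    rw [this, ih (i + 1) (by omega) (by omega) m]
    congr 1
    rw [List.append_assoc]
    congr 1
    exact (List.getElem_cons_drop hlt).symm ▸ rfl

theorem getConcatenation_spec : Claim_equal_getConcatenation := by
  intro nums _
  unfold Spec_getConcatenation getConcatenation getConcatenation_alt
  cases hn : nums with
  | nil => rfl
  | cons x xs =>
    subst hn
    set n := (x :: xs).length with hnlen
    have h2n : 2 * n = n + n := by omega
    rw [h2n]
    rw [show (0 : Int) = ((0 : Nat) : Int) from rfl,
      getConcatenationLoop_run (x :: xs) n 0 (by omega) (by omega) n []]
    simp only [List.nil_append, List.drop_zero]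
    -- now one step at index = n (wraps to 0), then run the remaining n - 1 steps from index 1
    cases hxs : n with
    | zero => simp [hnlen] at hxs
    | succ k =>
      rw [getConcatenationLoop]
      rw [if_pos (by simp)]
      have hget : (PySem.List.pyGet? (x :: xs) (0 : Int)).getD 0 = x := by
        rw [PySem.List.pyGet?_zero_cons]; rfl
      rw [hget]
      rw [show ((0 : Int) + 1) = ((1 : Nat) : Int) by norm_num]
      have hk : k = (x :: xs).length - 1 := by omega
      rw [show k = k + 0 by omega,
        getConcatenationLoop_run (x :: xs) k 1 (by simp only [List.length_cons]; omega) (by simp only [List.length_cons] at hk ⊢; omega) 0]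
      rw [getConcatenationLoop]
      simp

-- ===== VERDICT (by name: the statement is the Claim_ definition above) =====
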